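-- pv_equiv track=rewrite | github.com/Jdivya20/CP-elective3 | 09-nearestbusstop-Python/nearestbusstop.py | fun_nearestbusstop
-- ===== SOURCE A (Python) =====
-- def fun_nearestbusstop(street):
-- 	b=[]
-- 	for i in range(0,11):
-- 		a=8*i
-- 		b.append(a)
-- 	for j in range(len(b)-1):
-- 		if street in b:
-- 			return(street)
-- 		elif b[j]<street<b[j+1] and abs(b[j]-street)==abs(b[j+1]-street):
-- 			return(b[j])
-- 		elif b[j]<street<b[j+1] and abs(b[j]-street)<abs(b[j+1]-street):
-- 			return(b[j])
-- 		elif b[j]<street<b[j+1] and abs(b[j]-street)>abs(b[j+1]-street):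
-- 			return(b[j+1])
-- ===== SOURCE B (Python) =====
-- def fun_nearestbusstop(street):
--     # Nearest multiple-of-8 stop in [0, 80], ties rounded down, by arithmetic:
--     # adding 3 before floor-division by 8 rounds to the nearest multiple with
--     # ties going to the lower stop. No stop exists outside [0, 80].
--     if 0 <= street <= 80:
--         return ((street + 3) // 8) * 8
--     return None
-- ===== Notes on version B (the rewrite author's own statement) =====
-- stated objective: simpler
-- what changed: Replaces the built list of stops and the linear scan over adjacent pairs with a closed-form rounding formula ((street+3)//8)*8 guarded by the range check.
-- outside the precondition, e.g. on fun_nearestbusstop(-1): A returns None, B returns None; on fun_nearestbusstop(81): A returns None, B returns None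
import Mathlib
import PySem

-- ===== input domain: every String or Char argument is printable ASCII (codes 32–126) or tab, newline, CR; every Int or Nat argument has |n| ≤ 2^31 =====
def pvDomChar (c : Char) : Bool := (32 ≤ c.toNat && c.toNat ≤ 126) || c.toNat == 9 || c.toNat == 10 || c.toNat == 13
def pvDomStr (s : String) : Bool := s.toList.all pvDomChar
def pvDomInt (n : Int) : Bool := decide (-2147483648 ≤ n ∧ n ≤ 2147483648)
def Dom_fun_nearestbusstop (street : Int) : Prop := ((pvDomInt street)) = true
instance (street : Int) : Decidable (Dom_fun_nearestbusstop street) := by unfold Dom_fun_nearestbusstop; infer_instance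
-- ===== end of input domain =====

-- B replaces A's stop list and pairwise scan with a closed-form rounding formula (simpler).


-- ===== PORT A =====
-- b = [8*i for i in range(0,11)] built by the first loop
def pvBuildB : List Int :=
  (PySem.List.pyRange 0 11 1).foldl (fun acc i => acc ++ [8 * i]) []

-- second loop over j in range(len(b)-1); returns none when it falls through (Python's None)
def pvALoop (b : List Int) (street : Int) : List Int → Option Int
  | [] => none
  | j :: rest =>
    if b.contains street then some street
    else
      let bj := (PySem.List.pyGet? b j).getD 0
      let bj1 := (PySem.List.pyGet? b (j + 1)).getD 0
      if bj < street ∧ street < bj1 ∧ (bj - street).natAbs = (bj1 - street).natAbs then some bj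
      else if bj < street ∧ street < bj1 ∧ (bj - street).natAbs < (bj1 - street).natAbs then some bj
      else if bj < street ∧ street < bj1 ∧ (bj - street).natAbs > (bj1 - street).natAbs then some bj1
      else pvALoop b street rest

-- .getD 0 stands for Python's None; Pre_ admits exactly the inputs where A returns an int
def fun_nearestbusstop (street : Int) : Int :=
  (pvALoop pvBuildB street (PySem.List.pyRange 0 ((pvBuildB.length : Int) - 1) 1)).getD 0

-- ===== PORT B =====
-- the 'else 0' stands for Python's None; Pre_ excludes that branch
def fun_nearestbusstop_alt (street : Int) : Int :=
  if 0 ≤ street ∧ street ≤ 80 then PySem.Int.floordiv (street + 3) 8 * 8 else 0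

-- ===== PRECONDITION & SPEC =====
-- Pre_ excludes street < 0 or street > 80, where A falls through and returns None (not an int); B returns None there too.
def Pre_fun_nearestbusstop (street : Int) : Prop := 0 ≤ street ∧ street ≤ 80
instance (street : Int) : Decidable (Pre_fun_nearestbusstop street) := by unfold Pre_fun_nearestbusstop; infer_instance
def pvWitness_fun_nearestbusstop : Int := 13

def Spec_fun_nearestbusstop (street : Int) (out : Int) : Prop := out = fun_nearestbusstop_alt street
instance (street : Int) (out : Int) : Decidable (Spec_fun_nearestbusstop street out) := by unfold Spec_fun_nearestbusstop; infer_instance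

-- ===== CLAIM (what is proved, stated in full; the proofs are below) =====
def Claim_equal_fun_nearestbusstop : Prop := ∀ (street : Int), Dom_fun_nearestbusstop street → Pre_fun_nearestbusstop street → Spec_fun_nearestbusstop street (fun_nearestbusstop street)

-- ===== LEMMAS AND PROOFS =====

-- ===== VERDICT (by name: the statement is the Claim_ definition above) =====
theorem fun_nearestbusstop_spec : Claim_equal_fun_nearestbusstop := by
  intro street _ hpre
  unfold Spec_fun_nearestbusstop
  obtain ⟨h0, h80⟩ := hpre
  interval_cases street <;> decide
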